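-- pv_equiv track=rewrite | github.com/ShrihanSolo/projects | JMRProbability.py | dataCleaner
-- ===== SOURCE A (Python) =====
-- def dataCleaner(data):
--     cln_data_lst = [] #[["Team", [12, 12,3, 23,4 ,3 ]]]
--     data_lst = data.split()
--     for i in data_lst:
--         if not i.isdigit():
--             if len(cln_data_lst) == 0 or len(cln_data_lst[-1][-1]) > 0:
--                 cln_data_lst.append([i, []])
--             else:
--                 cln_data_lst[-1][0] = cln_data_lst[-1][0] + " " + i
--         else:
--             cln_data_lst[-1][-1].append(i)
--     return cln_data_lst
-- ===== SOURCE B (Python) =====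
-- def dataCleaner(data):
--     tokens = data.split()
--     out = []
--     i = 0
--     n = len(tokens)
--     while i < n:
--         k = tokens[i].isdigit()
--         j = i
--         while j < n and tokens[j].isdigit() == k:
--             j += 1
--         run = tokens[i:j]
--         if k:
--             out[-1][1].extend(run)
--         else:
--             out.append([" ".join(run), []])
--         i = j
--     return out
-- ===== Notes on version B (the rewrite author's own statement) =====
-- stated objective: alternative
-- what changed: B scans maximal runs of same-kind tokens (digit vs non-digit) and handles each run at once -- joining a word run into one team name and extending the number list with a whole digit run -- instead of A's token-by-token loop that inspects and mutates the last entry for every token.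
import Mathlib
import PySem

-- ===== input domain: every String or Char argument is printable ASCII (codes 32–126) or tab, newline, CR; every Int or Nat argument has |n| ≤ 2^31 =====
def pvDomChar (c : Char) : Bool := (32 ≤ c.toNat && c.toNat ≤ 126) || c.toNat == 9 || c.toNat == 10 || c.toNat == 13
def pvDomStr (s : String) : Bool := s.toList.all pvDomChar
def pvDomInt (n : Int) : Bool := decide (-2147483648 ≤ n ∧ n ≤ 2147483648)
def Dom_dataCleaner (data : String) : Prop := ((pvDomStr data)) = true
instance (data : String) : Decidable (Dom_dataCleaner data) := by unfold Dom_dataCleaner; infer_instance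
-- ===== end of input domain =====

-- B handles each maximal run of same-kind tokens at once (join a word run / extend with a whole
-- digit run) instead of A's token-by-token mutation of the last entry; objective: alternative
-- decomposition, same cost; equivalence is about the return value.

-- ===== PORT A =====
-- mutation of cln_data_lst[-1] (Python raises IndexError on the empty list — excluded by Pre_;
-- here the [] case returns [])
def pvModifyLast (f : String × List String → String × List String) :
    List (String × List String) → List (String × List String)
  | [] => []
  | p :: rest =>
    match rest with
    | [] => [f p]
    | q :: rest' => p :: pvModifyLast f (q :: rest')

-- one iteration of A's for-loop, same branch order
def pvStepA (acc : List (String × List String)) (i : String) : List (String × List String) :=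
  if ¬ PySem.Str.strIsdigit i then
    match acc.getLast? with   -- len(cln_data_lst) == 0 / cln_data_lst[-1]
    | none => acc ++ [(i, [])]
    | some p =>
      if p.2.length > 0 then acc ++ [(i, [])]
      else pvModifyLast (fun q => (q.1 ++ " " ++ i, q.2)) acc
  else
    pvModifyLast (fun q => (q.1, q.2 ++ [i])) acc

def dataCleaner (data : String) : List (String × List String) :=
  (PySem.Str.split₀ data).foldl pvStepA []

-- ===== PORT B =====
-- B's inner while-loop: maximal runs of tokens with equal .isdigit(), left to right
def pvRuns : List String → List (Bool × List String)
  | [] => []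
  | t :: rest =>
    (PySem.Str.strIsdigit t,
      t :: rest.takeWhile (fun x => PySem.Str.strIsdigit x == PySem.Str.strIsdigit t)) ::
      pvRuns (rest.dropWhile (fun x => PySem.Str.strIsdigit x == PySem.Str.strIsdigit t))
termination_by l => l.length
decreasing_by
  exact Nat.lt_succ_of_le (List.length_dropWhile_le _ _)

-- one iteration of B's outer while-loop, handling a whole run
def pvStepB (res : List (String × List String)) (r : Bool × List String) :
    List (String × List String) :=
  if r.1 then pvModifyLast (fun p => (p.1, p.2 ++ r.2)) res
  else res ++ [(PySem.Str.join " " r.2, [])]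

def dataCleaner_alt (data : String) : List (String × List String) :=
  (pvRuns (PySem.Str.split₀ data)).foldl pvStepB []

-- ===== PRECONDITION & SPEC =====
-- Pre_ excludes exactly the inputs whose first whitespace-token is all digits: there Python A
-- (and Python B) raise IndexError instead of returning.
def Pre_dataCleaner (data : String) : Prop :=
  ((PySem.Str.split₀ data).take 1).all (fun t => !PySem.Str.strIsdigit t) = true
instance (data : String) : Decidable (Pre_dataCleaner data) := by
  unfold Pre_dataCleaner; infer_instance

def pvWitness_dataCleaner : String := "Team Alpha 12 3 Beta 45"

def Spec_dataCleaner (data : String) (out : List (String × List String)) : Prop :=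
  out = dataCleaner_alt data
instance (data : String) (out : List (String × List String)) : Decidable (Spec_dataCleaner data out) := by
  unfold Spec_dataCleaner; infer_instance

-- ===== CLAIM (what is proved, stated in full; the proofs are below) =====
def Claim_equal_dataCleaner : Prop := ∀ (data : String), Dom_dataCleaner data →
  Pre_dataCleaner data → Spec_dataCleaner data (dataCleaner data)

-- ===== LEMMAS AND PROOFS =====

theorem pvModifyLast_concat (f : String × List String → String × List String)
    (l : List (String × List String)) (a : String × List String) :
    pvModifyLast f (l ++ [a]) = l ++ [f a] := by
  induction l with
  | nil => simp [pvModifyLast]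
  | cons p l ih =>
    cases l with
    | nil => simp [pvModifyLast]
    | cons q l' => simpa [pvModifyLast] using ih

theorem pvModifyLast_comp (f g : String × List String → String × List String)
    (l : List (String × List String)) :
    pvModifyLast f (pvModifyLast g l) = pvModifyLast (fun p => f (g p)) l := by
  rcases List.eq_nil_or_concat l with rfl | ⟨l', a, rfl⟩
  · rfl
  · simp [pvModifyLast_concat]

theorem pvModifyLast_id (l : List (String × List String)) :
    pvModifyLast (fun p => (p.1, p.2 ++ [])) l = l := by
  rcases List.eq_nil_or_concat l with rfl | ⟨l', a, rfl⟩
  · rfl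
  · simp [pvModifyLast_concat]

theorem pvModifyLast_congr (f g : String × List String → String × List String)
    (h : ∀ p, f p = g p) (l : List (String × List String)) :
    pvModifyLast f l = pvModifyLast g l := by
  rcases List.eq_nil_or_concat l with rfl | ⟨l', a, rfl⟩
  · rfl
  · simp [pvModifyLast_concat, h]

-- a run of digit tokens: A appends them one by one to the last entry's list
theorem foldl_stepA_digits (g : List String) (h : ∀ i ∈ g, PySem.Str.strIsdigit i = true) :
    ∀ acc, g.foldl pvStepA acc = pvModifyLast (fun p => (p.1, p.2 ++ g)) acc := by
  induction g with
  | nil => intro acc; exact (pvModifyLast_id acc).symm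
  | cons i g ih =>
    intro acc
    have hi : PySem.Str.strIsdigit i = true := h i (by simp)
    have hg : ∀ j ∈ g, PySem.Str.strIsdigit j = true := fun j hj => h j (by simp [hj])
    simp only [List.foldl_cons, pvStepA, hi, not_true_eq_false, if_false, ih hg,
      pvModifyLast_comp]
    exact pvModifyLast_congr _ _ (by intro p; simp) acc

-- a run of word tokens after a fresh entry: A folds them into the entry's name
theorem foldl_stepA_words (g : List String) (h : ∀ i ∈ g, PySem.Str.strIsdigit i = false) :
    ∀ (acc : List (String × List String)) (name : String),
      (g.foldl pvStepA (acc ++ [(name, [])])) =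
        acc ++ [(g.foldl (fun n i => n ++ " " ++ i) name, [])] := by
  induction g with
  | nil => intro acc name; simp
  | cons i g ih =>
    intro acc name
    have hi : PySem.Str.strIsdigit i = false := h i (by simp)
    have hg : ∀ j ∈ g, PySem.Str.strIsdigit j = false := fun j hj => h j (by simp [hj])
    simp only [List.foldl_cons, pvStepA, hi, Bool.false_eq_true, not_false_iff, if_true,
      List.getLast?_concat, List.length_nil, gt_iff_lt, lt_self_iff_false, if_false,
      pvModifyLast_concat]
    exact ih hg acc (name ++ " " ++ i)

theorem foldl_name_append (g : List String) :
    ∀ a b : String, g.foldl (fun n i => n ++ " " ++ i) (a ++ b) =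
      a ++ g.foldl (fun n i => n ++ " " ++ i) b := by
  induction g with
  | nil => intro a b; rfl
  | cons u g ih =>
    intro a b
    have hassoc : (a ++ b) ++ " " ++ u = a ++ (b ++ " " ++ u) := by
      simp [String.append_assoc]
    rw [List.foldl_cons, List.foldl_cons, hassoc, ih]

-- " ".join(t :: g) is A's left fold of " "-concatenations starting from t
theorem join_eq_foldl (g : List String) :
    ∀ t : String, PySem.Str.join " " (t :: g) = g.foldl (fun n i => n ++ " " ++ i) t := by
  induction g with
  | nil =>
    intro t
    apply String.toList_inj.mp
    rw [PySem.Str.toList_join]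
    simp [PySem.Chars.join_singleton]
  | cons u g ih =>
    intro t
    have step : PySem.Str.join " " (t :: u :: g) = t ++ " " ++ PySem.Str.join " " (u :: g) := by
      apply String.toList_inj.mp
      rw [PySem.Str.toList_join, List.map_cons, List.map_cons, PySem.Chars.join_cons_cons]
      simp [PySem.Str.toList_join]
    rw [step, ih u, ← foldl_name_append g (t ++ " ") u]
    simp [String.append_assoc]

theorem head?_dropWhile {α : Type} (p : α → Bool) (l : List α) (x : α)
    (h : (l.dropWhile p).head? = some x) : p x = false := by
  induction l with
  | nil => simp [List.dropWhile] at h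
  | cons a l ih =>
    rw [List.dropWhile_cons] at h
    by_cases ha : p a = true
    · exact ih (by simpa [ha] using h)
    · simp [ha] at h
      simpa [← h] using ha

-- invariant at a run boundary: if the next token is a word, the last entry (if any) has numbers
def pvGood (ts : List String) (acc : List (String × List String)) : Prop :=
  ∀ t, ts.head? = some t → PySem.Str.strIsdigit t = false →
    ∀ p, acc.getLast? = some p → p.2 ≠ []

theorem runs_fold_eq (n : Nat) : ∀ ts : List String, ts.length ≤ n →
    ∀ acc, pvGood ts acc →
      (pvRuns ts).foldl pvStepB acc = ts.foldl pvStepA acc := by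
  induction n with
  | zero =>
    intro ts hn acc _
    have : ts = [] := List.eq_nil_of_length_eq_zero (Nat.le_zero.mp hn)
    simp [this, pvRuns]
  | succ n ih =>
    intro ts hn acc hgood
    cases ts with
    | nil => simp [pvRuns]
    | cons t rest =>
      rw [pvRuns]
      set k := PySem.Str.strIsdigit t with hk
      set tk := rest.takeWhile (fun x => PySem.Str.strIsdigit x == k) with htk
      set dr := rest.dropWhile (fun x => PySem.Str.strIsdigit x == k) with hdr
      have hsplit : t :: rest = (t :: tk) ++ dr := by
        simp [htk, hdr, List.takeWhile_append_dropWhile]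
      have hdrlen : dr.length ≤ n := by
        have h2 : dr.length ≤ rest.length := by
          rw [hdr]; exact List.length_dropWhile_le _ _
        simp only [List.length_cons] at hn
        omega
      have htkmem : ∀ j ∈ tk, PySem.Str.strIsdigit j = k := by
        intro j hj
        rw [htk] at hj
        exact beq_iff_eq.mp
          (List.mem_takeWhile_imp (p := fun x => PySem.Str.strIsdigit x == k) hj)
      rw [List.foldl_cons]
      conv_rhs => rw [hsplit]
      rw [List.foldl_append]
      cases hkcase : k with
      | true =>
        -- digit run: both extend the last entry with the whole run
        have hkt : PySem.Str.strIsdigit t = true := by rw [← hk]; exact hkcase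
        have hA : (t :: tk).foldl pvStepA acc =
            pvModifyLast (fun p => (p.1, p.2 ++ (t :: tk))) acc := by
          apply foldl_stepA_digits
          intro i hi
          rcases List.mem_cons.mp hi with h1 | h1
          · rw [h1]; exact hkt
          · exact (htkmem i h1).trans hkcase
        have hB : pvStepB acc (true, t :: tk) =
            pvModifyLast (fun p => (p.1, p.2 ++ (t :: tk))) acc := by
          simp [pvStepB]
        rw [hB, hA]
        apply ih dr hdrlen
        -- invariant for the tail: the last entry now carries the nonempty digit run
        intro u _ _ p hp
        rcases List.eq_nil_or_concat acc with rfl | ⟨l, a, rfl⟩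
        · simp [pvModifyLast] at hp
        · rw [List.concat_eq_append, pvModifyLast_concat, List.getLast?_concat] at hp
          cases hp
          simp
      | false =>
        -- word run: a fresh entry whose name is the joined run
        have hkf : PySem.Str.strIsdigit t = false := by rw [← hk]; exact hkcase
        have hwords : ∀ i ∈ t :: tk, PySem.Str.strIsdigit i = false := by
          intro i hi
          rcases List.mem_cons.mp hi with h1 | h1
          · rw [h1]; exact hkf
          · exact (htkmem i h1).trans hkcase
        have hstep1 : pvStepA acc t = acc ++ [(t, [])] := by
          have ht : PySem.Str.strIsdigit t = false := hwords t (by simp)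
          rcases List.eq_nil_or_concat acc with rfl | ⟨l, a, rfl⟩
          · simp only [pvStepA, ht]
            simp
          · have ha : a.2 ≠ [] := by
              apply hgood t (by simp) ht
              rw [List.concat_eq_append, List.getLast?_concat]
            have hlen : 0 < a.2.length := List.length_pos_iff.mpr ha
            simp only [pvStepA, ht]
            simp [List.concat_eq_append, hlen]
        have hA : (t :: tk).foldl pvStepA acc =
            acc ++ [(tk.foldl (fun n i => n ++ " " ++ i) t, [])] := by
          rw [List.foldl_cons, hstep1]
          exact foldl_stepA_words tk (fun j hj => hwords j (by simp [hj])) acc t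
        have hB : pvStepB acc (false, t :: tk) =
            acc ++ [(tk.foldl (fun n i => n ++ " " ++ i) t, [])] := by
          simp [pvStepB, join_eq_foldl]
        rw [hB, hA]
        apply ih dr hdrlen
        -- the tail starts with a digit token (maximality), so the invariant is vacuous
        intro u hu hdig p _
        exfalso
        have := head?_dropWhile (fun x => PySem.Str.strIsdigit x == k) rest u (hdr ▸ hu)
        rw [hkcase] at this
        simp only [] at this
        rw [hdig, beq_self_eq_true] at this
        exact absurd this (by simp)

-- ===== VERDICT (by name: the statement is the Claim_ definition above) =====
theorem dataCleaner_spec : Claim_equal_dataCleaner := by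
  intro data _ _
  unfold Spec_dataCleaner dataCleaner dataCleaner_alt
  exact (runs_fold_eq (PySem.Str.split₀ data).length (PySem.Str.split₀ data) le_rfl []
    (by intro t _ _ p hp; simp at hp)).symm
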